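-- pv_equiv track=rewrite | github.com/leerizza/extractor_ssis_streamlit | sql_parser.py | _contains_union
-- ===== SOURCE A (Python) =====
-- def _contains_union(sql: str) -> bool:
--     """Check if SQL contains top-level UNION"""
--     depth = 0
--     i = 0
--     while i < len(sql):
--         if sql[i] == '(':
--             depth += 1
--         elif sql[i] == ')':
--             depth -= 1
--         elif depth == 0 and sql[i:i+5] == 'UNION':
--             # Check word boundary
--             if (i == 0 or not sql[i-1].isalnum()) and \
--                (i+5 >= len(sql) or not sql[i+5].isalnum()):
--                 return True
--         i += 1
--     return False
-- ===== SOURCE B (Python) =====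
-- def _contains_union(sql: str) -> bool:
--     """Check if SQL contains top-level UNION"""
--     n = len(sql)
--     depths = []
--     d = 0
--     for ch in sql:
--         depths.append(d)
--         if ch == '(':
--             d += 1
--         elif ch == ')':
--             d -= 1
--     return any(
--         depths[i] == 0
--         and sql[i:i+5] == 'UNION'
--         and (i == 0 or not sql[i-1].isalnum())
--         and (i + 5 >= n or not sql[i+5].isalnum())
--         for i in range(n)
--     )
-- ===== Notes on version B (the rewrite author's own statement) =====
-- stated objective: alternative
-- what changed: Replaces A's single stateful early-return while-scan by a two-phase decomposition: one pass precomputes the paren-depth before every position into a list, then a declarative any() over range(n) tests each position against the precomputed depth.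
import Mathlib
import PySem

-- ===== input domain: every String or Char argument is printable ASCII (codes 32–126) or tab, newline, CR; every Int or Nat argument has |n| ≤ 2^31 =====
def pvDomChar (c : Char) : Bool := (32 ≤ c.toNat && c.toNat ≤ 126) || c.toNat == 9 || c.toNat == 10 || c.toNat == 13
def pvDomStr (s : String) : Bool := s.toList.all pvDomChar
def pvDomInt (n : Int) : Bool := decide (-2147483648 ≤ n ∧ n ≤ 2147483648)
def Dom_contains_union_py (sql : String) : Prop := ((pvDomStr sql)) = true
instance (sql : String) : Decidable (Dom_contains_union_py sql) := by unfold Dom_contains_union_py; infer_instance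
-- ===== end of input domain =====

-- B changes the decomposition: A's single stateful early-return scan becomes
-- "precompute depth-before-each-position, then any() over all positions" (objective: alternative; same cost).

-- ===== PORT A =====
-- While loop of A: index i, running depth. sql[i:i+5] for 0 ≤ i is (drop i).take 5 (exact);
-- cs.getD (i-1) ' ' / cs.getD (i+5) ' ' are only evaluated with the index in range, where getD is Python-exact.
def containsUnionGo (cs : List Char) (depth : Int) (i : Nat) : Bool :=
  if h : i < cs.length then
    if cs[i] = '(' then containsUnionGo cs (depth + 1) (i + 1)
    else if cs[i] = ')' then containsUnionGo cs (depth - 1) (i + 1)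
    else if depth = 0 ∧ (cs.drop i).take 5 = "UNION".toList then
      if (i = 0 ∨ ¬ PySem.Chars.isalnum (cs.getD (i - 1) ' ')) ∧
         (cs.length ≤ i + 5 ∨ ¬ PySem.Chars.isalnum (cs.getD (i + 5) ' ')) then
        true
      else containsUnionGo cs depth (i + 1)
    else containsUnionGo cs depth (i + 1)
  else false
termination_by cs.length - i

def contains_union_py (sql : String) : Bool :=
  containsUnionGo sql.toList 0 0

-- ===== PORT B =====
-- Pass 1 of B: for ch in sql: depths.append(d); update d — a foldl carrying (depths, d).
def depthsLoop (cs : List Char) : List Int × Int :=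
  cs.foldl
    (fun st ch =>
      (st.1 ++ [st.2],
       if ch = '(' then st.2 + 1 else if ch = ')' then st.2 - 1 else st.2))
    (([] : List Int), (0 : Int))

-- Pass 2 of B: any(... for i in range(n)); depths[i] with 0 ≤ i < len is getD (Python-exact in range).
def contains_union_py_alt (sql : String) : Bool :=
  let cs := sql.toList
  let n := cs.length
  let depths := (depthsLoop cs).1
  (List.range n).any (fun i =>
    decide (depths.getD i 0 = 0) &&
    decide ((cs.drop i).take 5 = "UNION".toList) &&
    (decide (i = 0) || !PySem.Chars.isalnum (cs.getD (i - 1) ' ')) &&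
    (decide (n ≤ i + 5) || !PySem.Chars.isalnum (cs.getD (i + 5) ' ')))

-- ===== PRECONDITION & SPEC =====
def Spec_contains_union_py (sql : String) (out : Bool) : Prop := out = contains_union_py_alt sql
instance (sql : String) (out : Bool) : Decidable (Spec_contains_union_py sql out) := by unfold Spec_contains_union_py; infer_instance

-- ===== CLAIM (what is proved, stated in full; the proofs are below) =====
def Claim_equal_contains_union_py : Prop := ∀ (sql : String), Dom_contains_union_py sql → Spec_contains_union_py sql (contains_union_py sql)

-- ===== LEMMAS AND PROOFS =====

-- depth before position i (value of A's `depth` when the loop reaches index i)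
def balStep (d : Int) (ch : Char) : Int :=
  if ch = '(' then d + 1 else if ch = ')' then d - 1 else d

def balAt (cs : List Char) (i : Nat) : Int :=
  (cs.take i).foldl balStep 0

-- the per-position test both programs decide, phrased with balAt
def okAt (cs : List Char) (i : Nat) : Bool :=
  decide (balAt cs i = 0) &&
  decide ((cs.drop i).take 5 = "UNION".toList) &&
  (decide (i = 0) || !PySem.Chars.isalnum (cs.getD (i - 1) ' ')) &&
  (decide (cs.length ≤ i + 5) || !PySem.Chars.isalnum (cs.getD (i + 5) ' '))

theorem balAt_succ (cs : List Char) (i : Nat) (h : i < cs.length) :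
    balAt cs (i + 1) = balStep (balAt cs i) cs[i] := by
  unfold balAt
  rw [List.take_add_one, List.getElem?_eq_getElem h, Option.toList_some, List.foldl_append]
  rfl

theorem depthsLoop_spec (cs : List Char) :
    ∀ (acc : List Int) (d : Int),
      (cs.foldl
        (fun st ch =>
          (st.1 ++ [st.2],
           if ch = '(' then st.2 + 1 else if ch = ')' then st.2 - 1 else st.2))
        (acc, d)).1
      = acc ++ (List.range cs.length).map (fun k => (cs.take k).foldl balStep d) := by
  induction cs with
  | nil => intro acc d; simp
  | cons ch t ih =>
    intro acc d
    simp only [List.foldl_cons]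
    have hstep : (if ch = '(' then d + 1 else if ch = ')' then d - 1 else d) = balStep d ch := rfl
    rw [hstep, ih (acc ++ [d]) (balStep d ch)]
    rw [List.length_cons, List.range_succ_eq_map]
    simp [List.map_map, Function.comp, balStep]

theorem depths_getD (cs : List Char) (i : Nat) (h : i < cs.length) :
    (depthsLoop cs).1.getD i 0 = balAt cs i := by
  unfold depthsLoop
  rw [depthsLoop_spec cs [] 0]
  simp only [List.nil_append]
  rw [List.getD_eq_getElem?_getD, List.getElem?_map, List.getElem?_range h]
  rfl

-- B's result = any okAt over range
theorem alt_eq_any (sql : String) :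
    contains_union_py_alt sql
      = (List.range sql.toList.length).any (okAt sql.toList) := by
  unfold contains_union_py_alt
  apply PySem.List.any_congr_mem
  intro i hi
  rw [List.mem_range] at hi
  unfold okAt
  rw [depths_getD _ _ hi]

-- A's loop from position i (with the correct running depth) = any okAt over the remaining positions
theorem go_eq_any (cs : List Char) :
    ∀ i, containsUnionGo cs (balAt cs i) i
      = (List.range' i (cs.length - i)).any (okAt cs) := by
  intro i
  induction hn : cs.length - i using Nat.strong_induction_on generalizing i with
  | _ n ih =>
    unfold containsUnionGo
    by_cases h : i < cs.length
    · have hrec : containsUnionGo cs (balAt cs (i + 1)) (i + 1)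
          = (List.range' (i + 1) (cs.length - (i + 1))).any (okAt cs) :=
        ih (cs.length - (i + 1)) (by omega) (i + 1) rfl
      have hdrop : cs.drop i = cs[i] :: cs.drop (i + 1) :=
        List.drop_eq_getElem_cons h
      have hU : "UNION".toList = ['U', 'N', 'I', 'O', 'N'] := rfl
      have hcons : List.range' i (cs.length - i)
          = i :: List.range' (i + 1) (cs.length - (i + 1)) := by
        have hsub : cs.length - i = (cs.length - (i + 1)) + 1 := by omega
        rw [hsub, List.range'_succ]
      subst hn
      rw [hcons, List.any_cons]
      simp only [h, dif_pos]
      by_cases hp : cs[i] = '('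
      · have hok : okAt cs i = false := by
          have hne : ¬ ((cs.drop i).take 5 = ['U', 'N', 'I', 'O', 'N']) := by
            rw [hdrop, hp]; simp
          simp [okAt, hne]
        have hstep : balAt cs (i + 1) = balAt cs i + 1 := by
          rw [balAt_succ cs i h]; simp [balStep, hp]
        rw [if_pos hp, ← hstep, hrec, hok, Bool.false_or]
      · by_cases hq : cs[i] = ')'
        · have hok : okAt cs i = false := by
            have hne : ¬ ((cs.drop i).take 5 = ['U', 'N', 'I', 'O', 'N']) := by
              rw [hdrop, hq]; simp
            simp [okAt, hne]
          have hstep : balAt cs (i + 1) = balAt cs i - 1 := by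
            rw [balAt_succ cs i h]; simp [balStep, hq]
          rw [if_neg hp, if_pos hq, ← hstep, hrec, hok, Bool.false_or]
        · have hbal1 : balAt cs (i + 1) = balAt cs i := by
            rw [balAt_succ cs i h]; simp [balStep, hp, hq]
          rw [if_neg hp, if_neg hq]
          by_cases hm : balAt cs i = 0 ∧ (cs.drop i).take 5 = "UNION".toList
          · rw [if_pos hm]
            by_cases hb : (i = 0 ∨ ¬ PySem.Chars.isalnum (cs.getD (i - 1) ' ')) ∧
                (cs.length ≤ i + 5 ∨ ¬ PySem.Chars.isalnum (cs.getD (i + 5) ' '))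
            · rw [if_pos hb]
              have hok : okAt cs i = true := by
                simp only [List.getD_eq_getElem?_getD] at hb
                simp only [okAt, hm.1, hm.2]
                simp only [List.getD_eq_getElem?_getD]
                simp only [decide_true, Bool.true_and, Bool.and_eq_true, Bool.or_eq_true]
                constructor
                · rcases hb.1 with h1 | h1 <;> simp [h1]
                · rcases hb.2 with h2 | h2 <;> simp [h2]
              rw [hok]; simp
            · rw [if_neg hb]
              have hok : okAt cs i = false := by
                rcases Decidable.not_and_iff_not_or_not.mp hb with h1 | h1
                · push_neg at h1
                  simp only [List.getD_eq_getElem?_getD] at h1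
                  simp [okAt, h1.1, h1.2]
                · push_neg at h1
                  obtain ⟨hlt, haln⟩ := h1
                  rw [List.getD_eq_getElem?_getD, List.getElem?_eq_getElem hlt,
                    Option.getD_some] at haln
                  simp [okAt, hlt, haln]
              rw [← hbal1, hrec, hok, Bool.false_or]
          · rw [if_neg hm]
            have hok : okAt cs i = false := by
              rcases Decidable.not_and_iff_not_or_not.mp hm with h1 | h1
              · simp [okAt, h1]
              · rw [hU] at h1
                simp [okAt, h1]
            rw [← hbal1, hrec, hok, Bool.false_or]
    · have h0 : cs.length - i = 0 := by omega
      rw [h0] at hn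
      subst hn
      simp [h]

-- ===== VERDICT (by name: the statement is the Claim_ definition above) =====
theorem contains_union_py_spec : Claim_equal_contains_union_py := by
  intro sql _
  unfold Spec_contains_union_py contains_union_py
  rw [alt_eq_any]
  have h0 : balAt sql.toList 0 = 0 := by simp [balAt]
  rw [← h0, go_eq_any sql.toList 0, List.range_eq_range']
  simp
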